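-- pv_equiv track=rewrite | github.com/davecheng-ste/ICS3U-LiveHack-2-Practice | my_functions.py | generate_acronym
-- ===== SOURCE A (Python) =====
-- def generate_acronym(phrase, with_periods=False):
--     """
--     Generate an acronym from a given phrase.
--
--     Parameters:
--         phrase (str): The phrase from which to generate the acronym.
--         with_periods (bool, optional): If True, add periods after each letter in the acronym. Default is False.
--
--     Returns:
--         str: The acronym generated from the input phrase.
--     """
--     # Initialize an empty acronym
--     acronym = ""
--
--     # Initialize a flag to track whether the current character is the start of a new word
--     new_word = True
--
--     # Iterate over each character in the phrase
--     for char in phrase: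
--         # Check if the current character is a space (indicating the end of a word)
--         if char == " ":
--             new_word = True
--         # Check if the current character is not a space and it's the start of a new word
--         elif new_word:
--             # Add the uppercase version of the character to the acronym
--             acronym += char.upper()
--             # If with_periods is True, add a period
--             if with_periods:
--                 acronym += "."
--             # Set the flag to False, indicating that subsequent characters are not the start of a new word
--             new_word = False
--
--     return acronym
-- ===== SOURCE B (Python) =====
-- def generate_acronym(phrase, with_periods=False):
--     # Tokenize on the literal space (so tabs/newlines stay inside words),
--     # drop empty tokens, take each word's first letter.
--     return "".join(
--         w[0].upper() + ("." if with_periods else "")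
--         for w in phrase.split(" ")
--         if w
--     )
-- ===== Notes on version B (the rewrite author's own statement) =====
-- stated objective: simpler
-- what changed: Replaced A's character-by-character state machine with a new_word flag by split-on-literal-space, filter out empty tokens, map each word to its uppercased first letter (plus optional period), and join.
import Mathlib
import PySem

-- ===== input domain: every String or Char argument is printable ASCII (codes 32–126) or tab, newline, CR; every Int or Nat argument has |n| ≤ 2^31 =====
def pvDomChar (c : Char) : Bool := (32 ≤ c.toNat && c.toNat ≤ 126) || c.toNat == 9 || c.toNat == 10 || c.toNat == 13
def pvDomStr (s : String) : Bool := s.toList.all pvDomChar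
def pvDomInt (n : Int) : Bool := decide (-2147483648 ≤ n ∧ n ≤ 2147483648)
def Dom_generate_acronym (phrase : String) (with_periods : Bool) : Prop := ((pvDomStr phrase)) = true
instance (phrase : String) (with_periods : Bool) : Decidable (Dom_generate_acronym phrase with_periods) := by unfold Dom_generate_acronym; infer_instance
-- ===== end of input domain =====

-- B replaces A's character-by-character new_word flag state machine with split-on-space,
-- filter-empty, map-first-letter, join (objective: simpler decomposition; same O(n) cost).


-- ===== PORT A =====
-- A: fold over the characters with state (acronym, new_word flag), exactly as the Python loop.
def pvStepA (with_periods : Bool) (st : List Char × Bool) (char : Char) : List Char × Bool :=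
  if char == ' ' then (st.1, true)
  else if st.2 then
    let acronym := st.1 ++ [PySem.Chars.upperChar char]
    let acronym := if with_periods then acronym ++ ['.'] else acronym
    (acronym, false)
  else st

def generate_acronym (phrase : String) (with_periods : Bool) : String :=
  String.ofList (phrase.toList.foldl (pvStepA with_periods) ([], true)).1

-- ===== PORT B =====
-- B: w[0].upper() + ("." if with_periods else "") for each non-empty token of phrase.split(" ")
-- (str.split(" ") is List.splitOn ' '; "".join of the comprehension is the flatMap).
def pvEmit (with_periods : Bool) (w : List Char) : List Char :=
  PySem.Chars.upperChar w.headI :: (if with_periods then ['.'] else [])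

def generate_acronym_alt (phrase : String) (with_periods : Bool) : String :=
  String.ofList ((((phrase.toList.splitOn ' ').filter (fun w => w ≠ [])).map
    (pvEmit with_periods)).flatten)

-- ===== PRECONDITION & SPEC =====
def Spec_generate_acronym (phrase : String) (with_periods : Bool) (out : String) : Prop := out = generate_acronym_alt phrase with_periods
instance (phrase : String) (with_periods : Bool) (out : String) : Decidable (Spec_generate_acronym phrase with_periods out) := by unfold Spec_generate_acronym; infer_instance

-- ===== CLAIM (what is proved, stated in full; the proofs are below) =====
def Claim_equal_generate_acronym : Prop := ∀ (phrase : String) (with_periods : Bool), Dom_generate_acronym phrase with_periods → Spec_generate_acronym phrase with_periods (generate_acronym phrase with_periods)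

-- ===== LEMMAS AND PROOFS =====

-- B's core on a character list.
def pvB (wp : Bool) (cs : List Char) : List Char :=
  (((cs.splitOn ' ').filter (fun w => w ≠ [])).map (pvEmit wp)).flatten

-- What B contributes after the first (possibly empty) token of cs.
def pvBTail (wp : Bool) (cs : List Char) : List Char :=
  ((((cs.splitOn ' ').tail).filter (fun w => w ≠ [])).map (pvEmit wp)).flatten

theorem pvSplitOn_ne_nil (cs : List Char) : cs.splitOn ' ' ≠ [] := by
  induction cs with
  | nil => simp [List.splitOn]
  | cons c cs ih =>
    simp only [List.splitOn, List.splitOnP_cons] at *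
    split_ifs
    · simp
    · cases h : List.splitOnP (· == ' ') cs with
      | nil => exact absurd h ih
      | cons w ws => simp

theorem pvBTail_eq (wp : Bool) (cs : List Char) :
    pvBTail wp cs = pvB wp (cs.dropWhile (fun c => !(c == ' '))) := by
  induction cs with
  | nil => simp [pvBTail, pvB, List.splitOn]
  | cons c cs ih =>
    by_cases hc : c = ' '
    · subst hc
      simp only [pvBTail, pvB, List.splitOn, List.splitOnP_cons, List.dropWhile] at *
      simp
    · have hne : (c == ' ') = false := by simp [hc]
      simp only [pvBTail, List.splitOn, List.splitOnP_cons, hne, List.dropWhile,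
        Bool.not_false, if_false, ite_false] at *
      cases h : List.splitOnP (· == ' ') cs with
      | nil => exact absurd h (by simpa [List.splitOn] using pvSplitOn_ne_nil cs)
      | cons w ws =>
        simp only [List.modifyHead]
        simpa [pvBTail, List.splitOn, h] using ih

-- First token starting with a non-space c: B emits c's letter then continues after the word.
theorem pvB_cons_of_ne (wp : Bool) (c : Char) (cs : List Char) (hc : c ≠ ' ') :
    pvB wp (c :: cs) = pvEmit wp [c] ++ pvB wp (cs.dropWhile (fun c => !(c == ' '))) := by
  have hne : (c == ' ') = false := by simp [hc]
  rw [← pvBTail_eq]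
  simp only [pvB, pvBTail, List.splitOn, List.splitOnP_cons, hne]
  cases h : List.splitOnP (· == ' ') cs with
  | nil => exact absurd h (by simpa [List.splitOn] using pvSplitOn_ne_nil cs)
  | cons w ws => simp [pvEmit]

-- A leading space is dropped by B (it produces an empty token, filtered out).
theorem pvB_space_cons (wp : Bool) (cs : List Char) :
    pvB wp (' ' :: cs) = pvB wp cs := by
  simp [pvB, List.splitOn, List.splitOnP_cons]

-- Loop invariant for A's fold: the final acronym is the accumulator followed by
-- B's value of the rest (skipping to the next space first when mid-word).
theorem pvLoopA (wp : Bool) (cs : List Char) :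
    ∀ (acc : List Char) (nw : Bool),
      (cs.foldl (pvStepA wp) (acc, nw)).1 =
        acc ++ (if nw then pvB wp cs else pvB wp (cs.dropWhile (fun c => !(c == ' ')))) := by
  induction cs with
  | nil => intro acc nw; cases nw <;> simp [pvB, List.splitOn]
  | cons c cs ih =>
    intro acc nw
    by_cases hc : c = ' '
    · subst hc
      simp only [List.foldl_cons, pvStepA, beq_self_eq_true, if_true, ih, List.dropWhile, Bool.not_true]
      cases nw <;> simp [pvB_space_cons]
    · have hne : (c == ' ') = false := by simp [hc]
      cases nw with
      | true =>
        simp only [List.foldl_cons, pvStepA, hne, if_true, ih]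
        rw [pvB_cons_of_ne wp c cs hc]
        cases wp <;> simp [pvEmit, PySem.Chars.upperChar]
      | false =>
        simp [List.foldl_cons, pvStepA, hne, ih, List.dropWhile]

-- ===== VERDICT (by name: the statement is the Claim_ definition above) =====
theorem generate_acronym_spec : Claim_equal_generate_acronym := by
  intro phrase wp _
  show generate_acronym phrase wp = generate_acronym_alt phrase wp
  unfold generate_acronym generate_acronym_alt
  rw [pvLoopA wp phrase.toList [] true]
  simp [pvB]
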